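-- pv_equiv track=rewrite | github.com/Furzmund/furzpi-templates | tod/tools/msg.py | get_time_of_day
-- ===== SOURCE A (Python) =====
-- def in_range(min: int, max: int, val: int) -> bool:
--     """
--     Check if value is in the minimum and maximum of the range
--     :param min: minimum value
--     :param max: maximum value
--     :param value: value to test
--     :returns boolean
--     """
--     assert min <= max, "Min must be less than or equal to max"
--     return min <= val <= max
--
-- def get_time_of_day(hour: int) -> str:
--     """
--     Use the machine's time to determine the time of day
--     :param hour: 24-hour integer value (0-24)
--     :returns a string with the time of day, i.e. Morning
--     """
--     TIMES_OF_DAY = [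
--         [(0, 11), "Morgen"],
--         [(12, 16), "Tag"],
--         [(17, 21), "Abend"],
--         [(22, 24), "Nacht"],
--     ]
--     time_of_day: str = ""
--     for tod in TIMES_OF_DAY:
--         min, max = tod[0]
--         if in_range(min, max, hour):  # type: ignore
--             time_of_day = tod[1]  # type: ignore
--             break
--     return time_of_day
-- ===== SOURCE B (Python) =====
-- _RANGES = [((0, 11), "Morgen"), ((12, 16), "Tag"), ((17, 21), "Abend"), ((22, 24), "Nacht")]
-- _LOOKUP = {h: label for (lo, hi), label in _RANGES for h in range(lo, hi + 1)}
--
-- def get_time_of_day(hour: int) -> str: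
--     return _LOOKUP.get(hour, "")
-- ===== Notes on version B (the rewrite author's own statement) =====
-- stated objective: idiomatic
-- what changed: Replaces the per-call range scan with break by a precomputed hour-to-label dict expanded from the ranges once; the body is a single O(1) lookup with default "".
import Mathlib
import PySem

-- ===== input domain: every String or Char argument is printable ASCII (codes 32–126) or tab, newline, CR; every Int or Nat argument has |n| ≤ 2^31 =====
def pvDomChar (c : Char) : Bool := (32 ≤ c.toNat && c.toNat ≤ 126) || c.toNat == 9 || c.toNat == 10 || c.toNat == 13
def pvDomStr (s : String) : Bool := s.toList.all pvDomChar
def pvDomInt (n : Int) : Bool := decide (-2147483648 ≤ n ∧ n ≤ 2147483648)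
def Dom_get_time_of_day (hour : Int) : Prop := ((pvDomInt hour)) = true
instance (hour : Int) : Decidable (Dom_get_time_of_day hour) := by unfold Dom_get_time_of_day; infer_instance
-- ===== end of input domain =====

-- B precomputes a dict mapping each hour 0–24 to its label (expanded from the ranges once); A scans the ranges per call.

-- ===== PORT A =====
def in_range (min max val : Int) : Bool := min ≤ val && val ≤ max

-- the for-loop with break: first matching range wins, "" if none matches
def todLoop : List ((Int × Int) × String) → Int → String
  | [], _ => ""
  | tod :: rest, hour => if in_range tod.1.1 tod.1.2 hour then tod.2 else todLoop rest hour

def get_time_of_day (hour : Int) : String :=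
  todLoop [((0, 11), "Morgen"), ((12, 16), "Tag"), ((17, 21), "Abend"), ((22, 24), "Nacht")] hour

-- ===== PORT B =====
-- {h: label for (lo, hi), label in _RANGES for h in range(lo, hi + 1)}
def todLookup : PySem.Dict Int String :=
  ([((0, 11), "Morgen"), ((12, 16), "Tag"), ((17, 21), "Abend"), ((22, 24), "Nacht")] :
      List ((Int × Int) × String)).foldl
    (fun d p => (PySem.List.pyRange p.1.1 (p.1.2 + 1) 1).foldl (fun d h => d.insert h p.2) d)
    PySem.Dict.empty

def get_time_of_day_alt (hour : Int) : String := todLookup.getD hour ""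

-- ===== PRECONDITION & SPEC =====
def Spec_get_time_of_day (hour : Int) (out : String) : Prop := out = get_time_of_day_alt hour
instance (hour : Int) (out : String) : Decidable (Spec_get_time_of_day hour out) := by unfold Spec_get_time_of_day; infer_instance

-- ===== CLAIM (what is proved, stated in full; the proofs are below) =====
def Claim_equal_get_time_of_day : Prop := ∀ (hour : Int), Dom_get_time_of_day hour → Spec_get_time_of_day hour (get_time_of_day hour)

-- ===== LEMMAS AND PROOFS =====

-- ===== VERDICT (by name: the statement is the Claim_ definition above) =====
theorem get_time_of_day_spec : Claim_equal_get_time_of_day := by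
  intro hour _
  unfold Spec_get_time_of_day
  by_cases h : 0 ≤ hour ∧ hour ≤ 24
  · obtain ⟨h1, h2⟩ := h
    interval_cases hour <;> decide
  · have hd : todLookup = PySem.Dict.mk [((0 : Int), "Morgen"), ((1 : Int), "Morgen"), ((2 : Int), "Morgen"), ((3 : Int), "Morgen"), ((4 : Int), "Morgen"), ((5 : Int), "Morgen"), ((6 : Int), "Morgen"), ((7 : Int), "Morgen"), ((8 : Int), "Morgen"), ((9 : Int), "Morgen"), ((10 : Int), "Morgen"), ((11 : Int), "Morgen"), ((12 : Int), "Tag"), ((13 : Int), "Tag"), ((14 : Int), "Tag"), ((15 : Int), "Tag"), ((16 : Int), "Tag"), ((17 : Int), "Abend"), ((18 : Int), "Abend"), ((19 : Int), "Abend"), ((20 : Int), "Abend"), ((21 : Int), "Abend"), ((22 : Int), "Nacht"), ((23 : Int), "Nacht"), ((24 : Int), "Nacht")] := by decide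
    have hc : todLookup.contains hour = false := by
      rw [hd, PySem.Dict.contains_eq_decide_mem_keys]
      simp only [PySem.Dict.keys_mk, List.map, List.mem_cons, List.not_mem_nil,
        decide_eq_false_iff_not]
      simp only [or_false]
      omega
    rw [get_time_of_day_alt, PySem.Dict.getD_of_not_contains _ _ hc]
    simp only [get_time_of_day, todLoop, in_range, Bool.and_eq_true, decide_eq_true_eq]
    split_ifs <;> first | rfl | omega
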